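-- pv_equiv track=rewrite | github.com/afhcxv24-pixel/Ismail- | main_panel.py | Decrypt
-- ===== SOURCE A (Python) =====
-- def Decrypt(encoded_bytes):
--     encoded_bytes = bytes.fromhex(encoded_bytes)
--     number = 0
--     shift = 0
--     for byte in encoded_bytes:
--         value = byte & 0x7F
--         number |= value << shift
--         shift += 7
--         if not byte & 0x80:
--             break
--     return number
-- ===== SOURCE B (Python) =====
-- def Decrypt(encoded_bytes):
--     encoded_bytes = bytes.fromhex(encoded_bytes)
--     groups = []
--     for byte in encoded_bytes:
--         groups.append(byte & 0x7F)
--         if not byte & 0x80: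
--             break
--     number = 0
--     for value in reversed(groups):
--         number = number * 128 + value
--     return number
-- ===== Notes on version B (the rewrite author's own statement) =====
-- stated objective: alternative
-- what changed: B first collects the 7-bit groups into a list (same stop rule, terminator included), then combines them with Horner's method over the reversed list (number = number*128 + value), replacing A's running shift/OR accumulator; same asymptotic cost.
import Mathlib
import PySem

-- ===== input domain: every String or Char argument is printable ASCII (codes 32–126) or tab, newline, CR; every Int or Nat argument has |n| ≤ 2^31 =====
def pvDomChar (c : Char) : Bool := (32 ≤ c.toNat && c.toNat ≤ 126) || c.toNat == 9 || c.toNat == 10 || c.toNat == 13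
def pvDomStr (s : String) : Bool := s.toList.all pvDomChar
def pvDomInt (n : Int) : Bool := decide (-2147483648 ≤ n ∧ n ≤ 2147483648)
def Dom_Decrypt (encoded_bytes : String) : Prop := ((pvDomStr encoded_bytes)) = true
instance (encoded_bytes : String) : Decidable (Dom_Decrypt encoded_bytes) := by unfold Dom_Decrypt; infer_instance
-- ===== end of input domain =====

-- B replaces A's running shift/OR accumulator by collecting the 7-bit groups and then
-- combining them with Horner's method over the reversed list; return value only, same cost.

-- ===== PORT A =====

-- hand port of `bytes.fromhex` (no PySem primitive): skip ASCII whitespace between byte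
-- pairs, read two adjacent hex digits per byte; `none` = ValueError.  Exact on Dom_Decrypt
-- (Python additionally skips '\x0b'/'\x0c', which lie outside the printable+tab/nl/cr domain).
def pvHexDigit? (c : Char) : Option Nat :=
  if '0' ≤ c ∧ c ≤ '9' then some (c.toNat - 48)
  else if 'a' ≤ c ∧ c ≤ 'f' then some (c.toNat - 87)
  else if 'A' ≤ c ∧ c ≤ 'F' then some (c.toNat - 55)
  else none

def pvIsWs (c : Char) : Bool := c == ' ' || c == '\t' || c == '\n' || c == '\r'

def pvFromHex? : List Char → Option (List Nat)
  | [] => some []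
  | [c] => if pvIsWs c then some [] else none
  | c :: c2 :: rest =>
    if pvIsWs c then pvFromHex? (c2 :: rest)
    else match pvHexDigit? c, pvHexDigit? c2 with
      | some h, some l => (pvFromHex? rest).map (fun t => (16 * h + l) :: t)
      | _, _ => none

-- A's loop: `number |= (byte & 0x7F) << shift; shift += 7; break when high bit clear`
def decryptLoopA : List Nat → Nat → Nat → Nat
  | [], number, _ => number
  | b :: rest, number, shift =>
    let value := b &&& 0x7F
    let number := number ||| (value <<< shift)
    if b &&& 0x80 == 0 then number else decryptLoopA rest number (shift + 7)

def Decrypt (encoded_bytes : String) : Int :=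
  match pvFromHex? encoded_bytes.toList with
  | some bs => (decryptLoopA bs 0 0 : Nat)
  | none => 0   -- unreachable under Pre_Decrypt (Python raises ValueError here)

-- ===== PORT B =====

-- collect `byte & 0x7F` into `groups`, breaking after the first byte with the high bit clear
def decryptGroupsB : List Nat → List Nat
  | [] => []
  | b :: rest => (b &&& 0x7F) :: (if b &&& 0x80 == 0 then [] else decryptGroupsB rest)

def Decrypt_alt (encoded_bytes : String) : Int :=
  match pvFromHex? encoded_bytes.toList with
  | some bs => ((decryptGroupsB bs).reverse.foldl (fun number value => number * 128 + value) 0 : Nat)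
  | none => 0   -- unreachable under Pre_Decrypt (Python raises ValueError here)

-- ===== PRECONDITION & SPEC =====
-- shape of a valid `bytes.fromhex` input: whitespace-separated adjacent pairs of hex digits
def pvHexShape : List Char → Bool
  | [] => true
  | [c] => pvIsWs c
  | c :: c2 :: rest =>
    if pvIsWs c then pvHexShape (c2 :: rest)
    else (pvHexDigit? c).isSome && (pvHexDigit? c2).isSome && pvHexShape rest

-- Pre_ excludes exactly the strings that are not valid `bytes.fromhex` input, where Python A
-- raises ValueError.
def Pre_Decrypt (encoded_bytes : String) : Prop :=
  pvHexShape encoded_bytes.toList = true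
instance (encoded_bytes : String) : Decidable (Pre_Decrypt encoded_bytes) := by
  unfold Pre_Decrypt; infer_instance

def pvWitness_Decrypt : String := "e58e26"

def Spec_Decrypt (encoded_bytes : String) (out : Int) : Prop := out = Decrypt_alt encoded_bytes
instance (encoded_bytes : String) (out : Int) : Decidable (Spec_Decrypt encoded_bytes out) := by
  unfold Spec_Decrypt; infer_instance

-- ===== CLAIM (what is proved, stated in full; the proofs are below) =====
def Claim_equal_Decrypt : Prop := ∀ (encoded_bytes : String), Dom_Decrypt encoded_bytes → Pre_Decrypt encoded_bytes → Spec_Decrypt encoded_bytes (Decrypt encoded_bytes)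

-- ===== LEMMAS AND PROOFS =====

-- little-endian base-128 value of a list of groups
def pvVal (g : List Nat) : Nat := g.foldr (fun v acc => v + 128 * acc) 0

-- the shape predicate holds exactly when the parse succeeds
theorem pv_shape_isSome (l : List Char) : pvHexShape l = (pvFromHex? l).isSome := by
  induction l using pvFromHex?.induct <;>
    simp_all [pvHexShape, pvFromHex?] <;>
    (try cases hc : pvHexDigit? ‹Char› <;> simp_all) <;>
    (intro hs; rcases Option.isSome_iff_exists.mp hs with ⟨w, hw⟩; simp_all)

theorem pv_lor : ∀ (k a v : Nat), a < 2 ^ k → a ||| v <<< k = a + v * 2 ^ k := by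
  intro k
  induction k with
  | zero =>
    intro a v h
    have ha : a = 0 := by simpa using h
    subst ha; simp
  | succ k ih =>
    intro a v h
    have h2 : a / 2 < 2 ^ k := by
      have : 2 ^ (k + 1) = 2 * 2 ^ k := by ring
      omega
    have hrec := ih (a / 2) v h2
    have hb : Nat.bit (a.testBit 0) (a >>> 1) = a := Nat.bit_testBit_zero_shiftRight_one a
    have hv : v <<< (k + 1) = Nat.bit false (v <<< k) := by
      simp [Nat.bit, Nat.shiftLeft_eq, Nat.pow_succ]; ring
    have hlor := Nat.lor_bit (a.testBit 0) (a >>> 1) false (v <<< k)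
    rw [hb] at hlor
    rw [hv, hlor]
    simp only [Bool.or_false, Nat.shiftRight_one, hrec, Nat.bit_val, Nat.testBit_zero, Nat.pow_succ]
    have h3 : v * (2 ^ k * 2) = 2 * (v * 2 ^ k) := by ring
    by_cases hm : a % 2 = 1 <;> simp [hm] <;> omega

-- B's reversed Horner fold computes the little-endian base-128 value of the groups
theorem pv_foldl_reverse (g : List Nat) :
    g.reverse.foldl (fun number value => number * 128 + value) 0 = pvVal g := by
  induction g with
  | nil => rfl
  | cons v g ih =>
    simp only [List.reverse_cons, List.foldl_append, List.foldl_cons, List.foldl_nil, ih, pvVal,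
      List.foldr_cons]
    omega

-- A's accumulator loop, generalised: while the accumulator fits below the current shift,
-- it adds exactly 2^shift times the value of the groups B collects
theorem pv_loopA (bs : List Nat) : ∀ (n sh : Nat), n < 2 ^ sh →
    decryptLoopA bs n sh = n + 2 ^ sh * pvVal (decryptGroupsB bs) := by
  induction bs with
  | nil => intro n sh _; simp [decryptLoopA, decryptGroupsB, pvVal]
  | cons b rest ih =>
    intro n sh hn
    have hv : b &&& 0x7F < 128 := by
      have := Nat.and_le_right (n := b) (m := 0x7F)
      omega
    have hset : n ||| (b &&& 0x7F) <<< sh = n + (b &&& 0x7F) * 2 ^ sh := pv_lor sh n _ hn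
    by_cases hstop : b &&& 0x80 == 0
    · simp [decryptLoopA, decryptGroupsB, hstop, hset, pvVal]
      ring
    · have hn' : n + (b &&& 0x7F) * 2 ^ sh < 2 ^ (sh + 7) := by
        have h7 : 2 ^ (sh + 7) = 2 ^ sh * 128 := by rw [pow_add]; norm_num
        nlinarith [Nat.two_pow_pos sh]
      have hrec := ih (n + (b &&& 0x7F) * 2 ^ sh) (sh + 7) hn'
      simp [decryptLoopA, decryptGroupsB, hstop, hset, hrec, pvVal]
      have h7 : (2:Nat) ^ (sh + 7) = 2 ^ sh * 128 := by rw [pow_add]; norm_num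
      rw [h7]; ring

-- ===== VERDICT (by name: the statement is the Claim_ definition above) =====
theorem Decrypt_spec : Claim_equal_Decrypt := by
  intro s _ hpre
  unfold Spec_Decrypt Decrypt Decrypt_alt
  unfold Pre_Decrypt at hpre
  rw [pv_shape_isSome] at hpre
  cases h : pvFromHex? s.toList with
  | none => exact absurd hpre (by rw [h]; simp)
  | some bs =>
    have h1 := pv_loopA bs 0 0 (by norm_num)
    have h2 := pv_foldl_reverse (decryptGroupsB bs)
    simp only [h1, h2]
    norm_num
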